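-- pv_equiv track=rewrite | github.com/SHA1-un/3rd_year_projects | RW 244/Helper Calculation Programs/encode_ham.py | do_xor
-- ===== SOURCE A (Python) =====
-- def do_xor(arr):
--     xor_arr = []
--     col_arr = []
--     for i in range(4):
--         temp = []
--         for k in range(len(arr)):
--             temp.append(arr[k][i])
--         col_arr.append(temp)
--
--     for row in range(len(col_arr)):
--         result = int(col_arr[row][0])
--         for i in range(1,len(col_arr[0])):
--             result = result ^ int(col_arr[row][i])
--         xor_arr.append(int(result))
--     return xor_arr
-- ===== SOURCE B (Python) =====
-- def do_xor(arr):
--     res = [int(arr[0][i]) for i in range(4)]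
--     for row in arr[1:]:
--         res = [res[i] ^ int(row[i]) for i in range(4)]
--     return res
-- ===== Notes on version B (the rewrite author's own statement) =====
-- stated objective: simpler
-- what changed: Drops the transpose: instead of building 4 column lists and XOR-reducing each, B seeds the 4 accumulators from the first row and folds the remaining rows in a single row-major pass.
import Mathlib
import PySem

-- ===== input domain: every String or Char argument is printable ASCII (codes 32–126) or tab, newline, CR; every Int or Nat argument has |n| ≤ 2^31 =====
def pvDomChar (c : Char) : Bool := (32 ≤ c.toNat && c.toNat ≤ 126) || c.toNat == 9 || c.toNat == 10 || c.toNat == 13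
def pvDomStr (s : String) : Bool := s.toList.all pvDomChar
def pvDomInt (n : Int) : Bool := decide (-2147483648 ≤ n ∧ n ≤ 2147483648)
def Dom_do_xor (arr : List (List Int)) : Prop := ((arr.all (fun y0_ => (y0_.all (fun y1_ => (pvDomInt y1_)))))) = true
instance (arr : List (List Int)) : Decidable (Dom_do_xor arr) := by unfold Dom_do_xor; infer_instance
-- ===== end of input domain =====

-- B replaces A's transpose-then-reduce (build 4 column lists, then XOR-reduce each) with a
-- single row-major fold seeded from the first row: simpler, one pass, no column lists.


-- ===== PORT A =====
def do_xor (arr : List (List Int)) : List Int :=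
  let col_arr := (PySem.List.pyRange 0 4 1).foldl (fun col_arr i =>
    let temp := (PySem.List.pyRange 0 arr.length 1).foldl (fun temp k =>
      temp ++ [PySem.List.pyGetD (PySem.List.pyGetD arr k []) i 0]) []
    col_arr ++ [temp]) []
  (PySem.List.pyRange 0 col_arr.length 1).foldl (fun xor_arr row =>
    let result := PySem.List.pyGetD (PySem.List.pyGetD col_arr row []) 0 0
    let result := (PySem.List.pyRange 1 ((PySem.List.pyGetD col_arr 0 ([] : List Int)).length : Int) 1).foldl
      (fun r i => PySem.Int.bxor r (PySem.List.pyGetD (PySem.List.pyGetD col_arr row []) i 0)) result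
    xor_arr ++ [result]) []

-- ===== PORT B =====
def do_xor_alt (arr : List (List Int)) : List Int :=
  let res := (PySem.List.pyRange 0 4 1).map (fun i =>
    PySem.List.pyGetD (PySem.List.pyGetD arr 0 []) i 0)
  (PySem.List.slice arr (some 1) none).foldl (fun res row =>
    (PySem.List.pyRange 0 4 1).map (fun i =>
      PySem.Int.bxor (PySem.List.pyGetD res i 0) (PySem.List.pyGetD row i 0))) res

-- ===== PRECONDITION & SPEC =====
-- Python A raises IndexError on an empty matrix or when some row has fewer than 4 entries;
-- Pre_ excludes exactly those inputs (B raises there too).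
def Pre_do_xor (arr : List (List Int)) : Prop := arr ≠ [] ∧ ∀ r ∈ arr, 4 ≤ r.length
instance (arr : List (List Int)) : Decidable (Pre_do_xor arr) := by unfold Pre_do_xor; infer_instance
def pvWitness_do_xor : List (List Int) := [[1, 0, 1, 1], [0, 1, 1, 0]]

def Spec_do_xor (arr : List (List Int)) (out : List Int) : Prop := out = do_xor_alt arr
instance (arr : List (List Int)) (out : List Int) : Decidable (Spec_do_xor arr out) := by unfold Spec_do_xor; infer_instance

-- ===== CLAIM (what is proved, stated in full; the proofs are below) =====
def Claim_equal_do_xor : Prop := ∀ (arr : List (List Int)), Dom_do_xor arr → Pre_do_xor arr → Spec_do_xor arr (do_xor arr)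

-- ===== LEMMAS AND PROOFS =====

-- A's inner XOR loop over range(1, len) of a column is a foldl over the column's tail.
lemma inner_fold (x : Int) (xs : List Int) (n : Int) (hn : n = ((x::xs).length : Int)) :
    List.foldl (fun acc j => PySem.Int.bxor acc (PySem.List.pyGetD (x::xs) j 0))
      (PySem.List.pyGetD (x::xs) 0 0) (PySem.List.pyRange 1 n)
    = xs.foldl PySem.Int.bxor x := by
  subst hn
  rw [PySem.List.foldl_pyRange_pyGetD' (x::xs) 0 PySem.Int.bxor _ (by norm_num)]
  simp [PySem.List.pyGetD_zero_cons]

-- A on a nonempty matrix: the four per-column XOR folds, seeded from the first row.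
lemma a_eval (r : List Int) (rs : List (List Int)) :
    do_xor (r :: rs) =
    [(rs.map (fun row => PySem.List.pyGetD row 0 0)).foldl PySem.Int.bxor (PySem.List.pyGetD r 0 0),
     (rs.map (fun row => PySem.List.pyGetD row 1 0)).foldl PySem.Int.bxor (PySem.List.pyGetD r 1 0),
     (rs.map (fun row => PySem.List.pyGetD row 2 0)).foldl PySem.Int.bxor (PySem.List.pyGetD r 2 0),
     (rs.map (fun row => PySem.List.pyGetD row 3 0)).foldl PySem.Int.bxor (PySem.List.pyGetD r 3 0)] := by
  have hcol : ∀ i : Int,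
      (PySem.List.pyRange 0 (((r::rs).length : Nat) : Int) 1).foldl (fun temp k =>
        temp ++ [PySem.List.pyGetD (PySem.List.pyGetD (r::rs) k ([] : List Int)) i 0]) []
      = (r::rs).map (fun row => PySem.List.pyGetD row i 0) := by
    intro i
    rw [PySem.List.foldl_append_singleton_eq_map]
    rw [show (fun k => PySem.List.pyGetD (PySem.List.pyGetD (r::rs) k ([] : List Int)) i 0)
          = (fun row => PySem.List.pyGetD row i 0) ∘ (fun k => PySem.List.pyGetD (r::rs) k []) from rfl]
    rw [← List.map_map, PySem.List.map_pyGetD_pyRange_zero']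
    simp
  unfold do_xor
  rw [show (PySem.List.pyRange 0 4 1) = [(0:Int),1,2,3] from rfl]
  simp only [List.foldl_cons, List.foldl_nil, List.nil_append]
  rw [hcol 0, hcol 1, hcol 2, hcol 3]
  simp only [show ∀ (a b c d : List Int), [a]++[b]++[c]++[d] = [a,b,c,d] from by intros; rfl]
  simp only [List.map_cons, List.length_cons, List.length_nil]
  rw [show ((0+1+1+1+1 : Nat) : Int) = (4:Int) from by norm_num]
  rw [show (PySem.List.pyRange 0 4 1) = [(0:Int),1,2,3] from rfl]
  simp only [List.foldl_cons, List.foldl_nil, List.nil_append]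
  simp only [show ∀ (a b c d : List Int), PySem.List.pyGetD [a,b,c,d] (0:Int) [] = a from by intros; rfl,
             show ∀ (a b c d : List Int), PySem.List.pyGetD [a,b,c,d] (1:Int) [] = b from by intros; rfl,
             show ∀ (a b c d : List Int), PySem.List.pyGetD [a,b,c,d] (2:Int) [] = c from by intros; rfl,
             show ∀ (a b c d : List Int), PySem.List.pyGetD [a,b,c,d] (3:Int) [] = d from by intros; rfl]
  rw [inner_fold _ _ _ (by simp), inner_fold _ _ _ (by simp),
      inner_fold _ _ _ (by simp), inner_fold _ _ _ (by simp)]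
  rfl

-- B's fold over the remaining rows, seeded with a literal 4-list, computes the same four folds.
lemma alt_foldl (rs : List (List Int)) (a b c d : Int) :
    rs.foldl (fun res row =>
      (PySem.List.pyRange 0 4 1).map (fun i =>
        PySem.Int.bxor (PySem.List.pyGetD res i 0) (PySem.List.pyGetD row i 0))) [a, b, c, d]
    = [(rs.map (fun r => PySem.List.pyGetD r 0 0)).foldl PySem.Int.bxor a,
       (rs.map (fun r => PySem.List.pyGetD r 1 0)).foldl PySem.Int.bxor b,
       (rs.map (fun r => PySem.List.pyGetD r 2 0)).foldl PySem.Int.bxor c,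
       (rs.map (fun r => PySem.List.pyGetD r 3 0)).foldl PySem.Int.bxor d] := by
  induction rs generalizing a b c d with
  | nil => rfl
  | cons row rs ih =>
    simp only [List.foldl_cons, List.map_cons]
    rw [show (PySem.List.pyRange 0 4 1) = [(0:Int), 1, 2, 3] from rfl]
    simp only [List.map_cons, List.map_nil]
    exact ih _ _ _ _

lemma b_eval (r : List Int) (rs : List (List Int)) :
    do_xor_alt (r :: rs) =
    [(rs.map (fun row => PySem.List.pyGetD row 0 0)).foldl PySem.Int.bxor (PySem.List.pyGetD r 0 0),
     (rs.map (fun row => PySem.List.pyGetD row 1 0)).foldl PySem.Int.bxor (PySem.List.pyGetD r 1 0),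
     (rs.map (fun row => PySem.List.pyGetD row 2 0)).foldl PySem.Int.bxor (PySem.List.pyGetD r 2 0),
     (rs.map (fun row => PySem.List.pyGetD row 3 0)).foldl PySem.Int.bxor (PySem.List.pyGetD r 3 0)] := by
  unfold do_xor_alt
  rw [PySem.List.slice_from_one]
  rw [show (PySem.List.pyRange 0 4 1) = [(0:Int), 1, 2, 3] from rfl]
  simp only [List.map_cons, List.map_nil, PySem.List.pyGetD_zero_cons]
  exact alt_foldl rs _ _ _ _

-- ===== VERDICT (by name: the statement is the Claim_ definition above) =====
theorem do_xor_spec : Claim_equal_do_xor := by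
  intro arr _ hpre
  obtain ⟨hne, -⟩ := hpre
  cases arr with
  | nil => exact absurd rfl hne
  | cons r rs => show do_xor (r :: rs) = do_xor_alt (r :: rs); rw [a_eval, b_eval]
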